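-- pv_equiv track=rewrite | github.com/NetworkMathematics/IndianaProjects | glossary/src/extract_terms.py | _split_template_params
-- ===== SOURCE A (Python) =====
-- def _split_template_params(text: str) -> list[str]:
--     """split template inner text on bare | (not inside [[ ]], {{ }}, or < >)."""
--     params = []
--     depth_sq = 0
--     depth_cur = 0
--     depth_angle = 0
--     start = 0
--     i = 0
--     while i < len(text):
--         ch = text[i]
--         if text[i:i+2] == "[[":
--             depth_sq += 1
--             i += 2
--             continue
--         elif text[i:i+2] == "]]":
--             depth_sq = max(0, depth_sq - 1)
--             i += 2
--             continue
--         elif text[i:i+2] == "{{":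
--             depth_cur += 1
--             i += 2
--             continue
--         elif text[i:i+2] == "}}":
--             depth_cur = max(0, depth_cur - 1)
--             i += 2
--             continue
--         elif ch == "<":
--             depth_angle += 1
--         elif ch == ">":
--             depth_angle = max(0, depth_angle - 1)
--         elif ch == "|" and depth_sq == 0 and depth_cur == 0 and depth_angle == 0:
--             params.append(text[start:i])
--             start = i + 1
--         i += 1
--     params.append(text[start:])
--     return params
-- ===== SOURCE B (Python) =====
-- def _split_template_params(text: str) -> list[str]:
--     """split template inner text on bare | (not inside [[ ]], {{ }}, or < >)."""
--     n = len(text)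
--     # stage 1: tokenize
--     toks = []
--     i = 0
--     while i < n:
--         two = text[i:i+2]
--         if two in ("[[", "]]", "{{", "}}"):
--             toks.append((i, two))
--             i += 2
--         elif text[i] in "<>|":
--             toks.append((i, text[i]))
--             i += 1
--         else:
--             i += 1
--     # stage 2: pair brackets into explicitly covered intervals (per-type stacks);
--     # an unmatched opener covers to the end of the text, unmatched closers are ignored
--     intervals = []
--     for op, cl in (("[[", "]]"), ("{{", "}}"), ("<", ">")):
--         stack = []
--         for pos, tok in toks:
--             if tok == op:
--                 stack.append(pos)
--             elif tok == cl and stack: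
--                 intervals.append((stack.pop(), pos))
--         for pos in stack:
--             intervals.append((pos, n))
--     # stage 3: bare pipes = '|' tokens inside no interval
--     cuts = [pos for pos, tok in toks
--             if tok == "|" and not any(a < pos < b for a, b in intervals)]
--     # stage 4: slice at the cut positions
--     parts = []
--     start = 0
--     for c in cuts:
--         parts.append(text[start:c])
--         start = c + 1
--     parts.append(text[start:])
--     return parts
-- ===== Notes on version B (the rewrite author's own statement) =====
-- stated objective: alternative
-- what changed: Replaces A's single-pass clamped depth counters with a staged pipeline: tokenize, pair brackets of each type into explicit covered intervals with a matching stack (unmatched openers cover to the end, stray closers are dropped), keep the pipe tokens lying inside no interval, then slice the text at those cut positions; no depth counter is ever maintained.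
import Mathlib
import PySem

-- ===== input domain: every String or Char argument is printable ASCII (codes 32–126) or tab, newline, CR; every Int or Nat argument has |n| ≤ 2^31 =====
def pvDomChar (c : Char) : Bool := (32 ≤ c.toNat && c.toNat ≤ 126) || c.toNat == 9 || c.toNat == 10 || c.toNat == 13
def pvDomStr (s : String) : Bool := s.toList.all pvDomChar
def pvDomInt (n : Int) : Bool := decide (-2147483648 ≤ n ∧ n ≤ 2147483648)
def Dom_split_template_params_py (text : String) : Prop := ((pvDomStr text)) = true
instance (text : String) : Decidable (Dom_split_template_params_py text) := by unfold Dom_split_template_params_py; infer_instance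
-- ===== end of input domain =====

-- B replaces A's single-pass clamped depth counters by a staged pipeline: tokenize, pair each
-- bracket type into explicit covered intervals with a matching stack, keep the '|' tokens lying
-- inside no interval, then slice at those cut positions; same return value, alternative structure.

-- ===== PORT A =====
-- literal port of A's while loop: index i, slice text[start:i] (all slice indices here are
-- nonnegative and start ≤ i, so Python's slice is exactly drop/take)
-- (fuel ≥ cs.length - i is a totality guard only; the entry point passes cs.length)
def pvALoop (cs : List Char) : List (List Char) → Int → Int → Int → Nat → Nat → Nat → List (List Char)
  | params, _, _, _, start, _, 0 => params ++ [cs.drop start]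
  | params, sq, cur, angle, start, i, fuel + 1 =>
    if h : i < cs.length then
      let two := (cs.drop i).take 2
      if two = ['[', '['] then pvALoop cs params (sq + 1) cur angle start (i + 2) fuel
      else if two = [']', ']'] then pvALoop cs params (max 0 (sq - 1)) cur angle start (i + 2) fuel
      else if two = ['{', '{'] then pvALoop cs params sq (cur + 1) angle start (i + 2) fuel
      else if two = ['}', '}'] then pvALoop cs params sq (max 0 (cur - 1)) angle start (i + 2) fuel
      else if cs[i] = '<' then pvALoop cs params sq cur (angle + 1) start (i + 1) fuel
      else if cs[i] = '>' then pvALoop cs params sq cur (max 0 (angle - 1)) start (i + 1) fuel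
      else if cs[i] = '|' ∧ sq = 0 ∧ cur = 0 ∧ angle = 0 then
        pvALoop cs (params ++ [(cs.drop start).take (i - start)]) sq cur angle (i + 1) (i + 1) fuel
      else pvALoop cs params sq cur angle start (i + 1) fuel
    else params ++ [cs.drop start]

def split_template_params_py (text : String) : List String :=
  (pvALoop text.toList [] 0 0 0 0 0 text.toList.length).map String.ofList

-- ===== PORT B =====
-- stage 1 of Source B: the token list [(pos, token text)], two-char tokens first, non-overlapping
def pvTok : List Char → Nat → List (Nat × List Char)
  | [], _ => []
  | c :: rest, i =>
    let two := (c :: rest).take 2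
    if two = ['[', '['] ∨ two = [']', ']'] ∨ two = ['{', '{'] ∨ two = ['}', '}'] then
      (i, two) :: pvTok (rest.drop 1) (i + 2)
    else if c = '<' ∨ c = '>' ∨ c = '|' then
      (i, [c]) :: pvTok rest (i + 1)
    else pvTok rest (i + 1)
termination_by cs _ => cs.length
decreasing_by all_goals simp_all

-- stage 2 of Source B for one (op, cl) pair: the matching stack (cons = Python's append/pop end),
-- closed pairs emitted in encounter order, unmatched openers cover to n (oldest first)
def pvPair (n : Nat) (op cl : List Char) : List (Nat × List Char) → List Nat → List (Nat × Nat)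
  | [], stack => stack.reverse.map (fun s => (s, n))
  | t :: ts, stack =>
    if t.2 = op then pvPair n op cl ts (t.1 :: stack)
    else if t.2 = cl then
      match stack with
      | [] => pvPair n op cl ts []
      | s :: rest => (s, t.1) :: pvPair n op cl ts rest
    else pvPair n op cl ts stack

-- 'any(a < pos < b for a, b in intervals)'
def pvCov (ivs : List (Nat × Nat)) (q : Nat) : Bool :=
  ivs.any (fun ab => ab.1 < q && q < ab.2)

def split_template_params_py_alt (text : String) : List String :=
  let cs := text.toList
  let n := cs.length
  let toks := pvTok cs 0
  let ivs := pvPair n ['[', '['] [']', ']'] toks [] ++ pvPair n ['{', '{'] ['}', '}'] toks []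
             ++ pvPair n ['<'] ['>'] toks []
  let cuts := (toks.filter (fun t => t.2 == ['|'] && !(pvCov ivs t.1))).map Prod.fst
  let fin := cuts.foldl
    (fun (st : List (List Char) × Nat) c => (st.1 ++ [(cs.drop st.2).take (c - st.2)], c + 1))
    ([], 0)
  (fin.1 ++ [cs.drop fin.2]).map String.ofList

-- ===== PRECONDITION & SPEC =====
def Spec_split_template_params_py (text : String) (out : List String) : Prop := out = split_template_params_py_alt text
instance (text : String) (out : List String) : Decidable (Spec_split_template_params_py text out) := by unfold Spec_split_template_params_py; infer_instance

-- ===== CLAIM =====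
def Claim_equal_split_template_params_py : Prop := ∀ (text : String), Dom_split_template_params_py text → Spec_split_template_params_py text (split_template_params_py text)

-- ===== LEMMAS AND PROOFS =====

-- proof-side view of A: the depth-counter run over the token list
def pvDRun (cs : List Char) : List (Nat × List Char) → List (List Char) → Int → Int → Int → Nat → List (List Char)
  | [], params, _, _, _, start => params ++ [cs.drop start]
  | t :: ts, params, sq, cur, angle, start =>
    if t.2 = ['[', '['] then pvDRun cs ts params (sq + 1) cur angle start
    else if t.2 = [']', ']'] then pvDRun cs ts params (max 0 (sq - 1)) cur angle start
    else if t.2 = ['{', '{'] then pvDRun cs ts params sq (cur + 1) angle start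
    else if t.2 = ['}', '}'] then pvDRun cs ts params sq (max 0 (cur - 1)) angle start
    else if t.2 = ['<'] then pvDRun cs ts params sq cur (angle + 1) start
    else if t.2 = ['>'] then pvDRun cs ts params sq cur (max 0 (angle - 1)) start
    else if t.2 = ['|'] ∧ sq = 0 ∧ cur = 0 ∧ angle = 0 then
      pvDRun cs ts (params ++ [(cs.drop start).take (t.1 - start)]) sq cur angle (t.1 + 1)
    else pvDRun cs ts params sq cur angle start

-- cut positions of the depth-counter run
def pvCutsD : List (Nat × List Char) → Int → Int → Int → List Nat
  | [], _, _, _ => []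
  | t :: ts, sq, cur, angle =>
    if t.2 = ['[', '['] then pvCutsD ts (sq + 1) cur angle
    else if t.2 = [']', ']'] then pvCutsD ts (max 0 (sq - 1)) cur angle
    else if t.2 = ['{', '{'] then pvCutsD ts sq (cur + 1) angle
    else if t.2 = ['}', '}'] then pvCutsD ts sq (max 0 (cur - 1)) angle
    else if t.2 = ['<'] then pvCutsD ts sq cur (angle + 1)
    else if t.2 = ['>'] then pvCutsD ts sq cur (max 0 (angle - 1))
    else if t.2 = ['|'] ∧ sq = 0 ∧ cur = 0 ∧ angle = 0 then t.1 :: pvCutsD ts sq cur angle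
    else pvCutsD ts sq cur angle

-- recursive view of B's stage 4
def pvSplitAt (cs : List Char) : List Nat → List (List Char) → Nat → List (List Char)
  | [], params, start => params ++ [cs.drop start]
  | c :: cuts, params, start => pvSplitAt cs cuts (params ++ [(cs.drop start).take (c - start)]) (c + 1)

theorem pvSplitAt_foldl (cs : List Char) : ∀ (cuts : List Nat) (params : List (List Char)) (start : Nat),
    pvSplitAt cs cuts params start =
      (cuts.foldl (fun (st : List (List Char) × Nat) c => (st.1 ++ [(cs.drop st.2).take (c - st.2)], c + 1)) (params, start)).1
        ++ [cs.drop (cuts.foldl (fun (st : List (List Char) × Nat) c => (st.1 ++ [(cs.drop st.2).take (c - st.2)], c + 1)) (params, start)).2] := by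
  intro cuts
  induction cuts with
  | nil => intro params start; rfl
  | cons c cuts ih => intro params start; simp only [pvSplitAt, List.foldl_cons]; exact ih _ _

theorem pv_main (cs : List Char) : ∀ (n : Nat) (params : List (List Char))
    (sq cur angle : Int) (start i : Nat), cs.length - i ≤ n →
    pvALoop cs params sq cur angle start i n =
      pvDRun cs (pvTok (cs.drop i) i) params sq cur angle start := by
  intro n
  induction n with
  | zero =>
    intro params sq cur angle start i hn
    have hge : cs.length ≤ i := by omega
    rw [pvALoop, List.drop_eq_nil_of_le hge, pvTok, pvDRun]
  | succ n ih =>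
    intro params sq cur angle start i hn
    by_cases h : i < cs.length
    · have hd : cs.drop i = cs[i] :: cs.drop (i + 1) := List.drop_eq_getElem_cons h
      have hdd : (cs.drop (i + 1)).drop 1 = cs.drop (i + 2) := by
        rw [List.drop_drop]
      have htok : pvTok (cs.drop i) i =
          (let two := (cs[i] :: cs.drop (i + 1)).take 2
           if two = ['[', '['] ∨ two = [']', ']'] ∨ two = ['{', '{'] ∨ two = ['}', '}'] then
             (i, two) :: pvTok ((cs.drop (i + 1)).drop 1) (i + 2)
           else if cs[i] = '<' ∨ cs[i] = '>' ∨ cs[i] = '|' then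
             (i, [cs[i]]) :: pvTok (cs.drop (i + 1)) (i + 1)
           else pvTok (cs.drop (i + 1)) (i + 1)) := by
        rw [hd, pvTok]
      rw [pvALoop, dif_pos h, htok, hd, hdd]
      generalize hc : cs[i] = c
      by_cases h1 : (c :: cs.drop (i + 1)).take 2 = ['[', '[']
      · simp only [h1, true_or, if_true, pvDRun]
        exact ih params (sq + 1) cur angle start (i + 2) (by omega)
      · by_cases h2 : (c :: cs.drop (i + 1)).take 2 = [']', ']']
        · simp only [h1, h2, true_or, or_true, if_true, if_false, pvDRun]
          exact ih params (max 0 (sq - 1)) cur angle start (i + 2) (by omega)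
        · by_cases h3 : (c :: cs.drop (i + 1)).take 2 = ['{', '{']
          · simp only [h1, h2, h3, true_or, or_true, ite_true, if_false, pvDRun]
            exact ih params sq (cur + 1) angle start (i + 2) (by omega)
          · by_cases h4 : (c :: cs.drop (i + 1)).take 2 = ['}', '}']
            · simp only [h1, h2, h3, h4, or_true, ite_true, if_false, pvDRun]
              exact ih params sq (max 0 (cur - 1)) angle start (i + 2) (by omega)
            · by_cases h5 : c = '<'
              · simp only [h1, h2, h3, h4, h5, true_or, or_self, if_false, ite_true, pvDRun]
                exact ih params sq cur (angle + 1) start (i + 1) (by omega)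
              · by_cases h6 : c = '>'
                · simp only [h1, h2, h3, h4, h5, h6, true_or, or_true, or_self, if_false, ite_true, pvDRun]
                  exact ih params sq cur (max 0 (angle - 1)) start (i + 1) (by omega)
                · by_cases h7 : c = '|'
                  · subst h7
                    by_cases h8 : sq = 0 ∧ cur = 0 ∧ angle = 0
                    · obtain ⟨e1, e2, e3⟩ := h8
                      subst e1; subst e2; subst e3
                      simp only [h1, h2, h3, h4, h5, h6, or_true, or_self, and_self,
                        if_false, ite_true, pvDRun]
                      exact ih (params ++ [(cs.drop start).take (i - start)]) 0 0 0
                        (i + 1) (i + 1) (by omega)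
                    · simp only [h1, h2, h3, h4, h5, h6, h8, or_true, or_self, and_false,
                        if_false, ite_true, pvDRun]
                      exact ih params sq cur angle start (i + 1) (by omega)
                  · simp only [h1, h2, h3, h4, h5, h6, h7, or_self, if_false]
                    exact ih params sq cur angle start (i + 1) (by omega)
    · have hge : cs.length ≤ i := by omega
      rw [pvALoop, dif_neg (by omega), List.drop_eq_nil_of_le hge, pvTok, pvDRun]

theorem pvDRun_splitAt (cs : List Char) : ∀ (ts : List (Nat × List Char)) (params : List (List Char))
    (sq cur angle : Int) (start : Nat),
    pvDRun cs ts params sq cur angle start = pvSplitAt cs (pvCutsD ts sq cur angle) params start := by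
  intro ts
  induction ts with
  | nil => intro params sq cur angle start; rfl
  | cons t ts ih =>
    intro params sq cur angle start
    rw [pvDRun, pvCutsD]
    split_ifs with h1 h2 h3 h4 h5 h6 h7 <;> exact ih _ _ _ _ _

theorem pvTok_lb : ∀ (m : Nat) (cs : List Char) (i : Nat), cs.length ≤ m →
    ∀ t ∈ pvTok cs i, i ≤ t.1 ∧ t.1 < i + cs.length := by
  intro m
  induction m with
  | zero =>
    intro cs i hm
    have : cs = [] := List.length_eq_zero_iff.mp (by omega)
    subst this; intro t ht; simp [pvTok] at ht
  | succ m ih =>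
    intro cs i hm
    match cs with
    | [] => intro t ht; simp [pvTok] at ht
    | c :: rest =>
      rw [pvTok]
      split_ifs with h1 h2 <;> intro t ht
      · rcases List.mem_cons.mp ht with he | ht
        · subst he; simp
        · have := ih (rest.drop 1) (i + 2) (by simp at hm ⊢; omega) t ht
          simp at this ⊢; omega
      · rcases List.mem_cons.mp ht with he | ht
        · subst he; simp
        · have := ih rest (i + 1) (by simp at hm; omega) t ht
          simp at this ⊢; omega
      · have := ih rest (i + 1) (by simp at hm; omega) t ht
        simp at this ⊢; omega

theorem pvTok_pairwise : ∀ (m : Nat) (cs : List Char) (i : Nat), cs.length ≤ m →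
    List.Pairwise (fun a b => a.1 < b.1) (pvTok cs i) := by
  intro m
  induction m with
  | zero =>
    intro cs i hm
    have : cs = [] := List.length_eq_zero_iff.mp (by omega)
    subst this; simp [pvTok]
  | succ m ih =>
    intro cs i hm
    match cs with
    | [] => simp [pvTok]
    | c :: rest =>
      rw [pvTok]
      split_ifs with h1 h2
      · refine List.Pairwise.cons ?_ (ih (rest.drop 1) (i + 2) (by simp at hm ⊢; omega))
        intro t ht
        have := pvTok_lb (m) (rest.drop 1) (i + 2) (by simp at hm ⊢; omega) t ht
        simp; omega
      · refine List.Pairwise.cons ?_ (ih rest (i + 1) (by simp at hm; omega))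
        intro t ht
        have := pvTok_lb m rest (i + 1) (by simp at hm; omega) t ht
        simp; omega
      · exact ih rest (i + 1) (by simp at hm; omega)

theorem pvC (n : Nat) (op cl : List Char) : ∀ (ts : List (Nat × List Char)) (stack : List Nat) (q : Nat),
    q < n → (∀ t ∈ ts, q < t.1) →
    (pvCov (pvPair n op cl ts stack) q = true ↔ ∃ s ∈ stack, s < q) := by
  intro ts
  induction ts with
  | nil =>
    intro stack q hq _
    simp [pvPair, pvCov, List.any_map, List.any_eq_true, hq]
  | cons t ts ih =>
    intro stack q hq hpos
    have hq1 : q < t.1 := hpos t (List.mem_cons_self ..)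
    have hpos' : ∀ t' ∈ ts, q < t'.1 := fun t' ht' => hpos t' (List.mem_cons_of_mem _ ht')
    simp only [pvPair]
    split_ifs with h1 h2
    · rw [ih (t.1 :: stack) q hq hpos']
      constructor
      · rintro ⟨s, hs, hlt⟩
        rcases List.mem_cons.mp hs with he | hs
        · omega
        · exact ⟨s, hs, hlt⟩
      · rintro ⟨s, hs, hlt⟩; exact ⟨s, List.mem_cons_of_mem _ hs, hlt⟩
    · match stack with
      | [] => rw [ih [] q hq hpos']
      | s :: rest =>
        have hcons : pvCov ((s, t.1) :: pvPair n op cl ts rest) q =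
            ((s < q && q < t.1) || pvCov (pvPair n op cl ts rest) q) := by
          simp [pvCov]
        rw [hcons]
        simp only [Bool.or_eq_true, ih rest q hq hpos', Bool.and_eq_true, decide_eq_true_eq]
        constructor
        · rintro (⟨hs, _⟩ | ⟨s', hs', hlt⟩)
          · exact ⟨s, List.mem_cons_self .., hs⟩
          · exact ⟨s', List.mem_cons_of_mem _ hs', hlt⟩
        · rintro ⟨s', hs', hlt⟩
          rcases List.mem_cons.mp hs' with he | hs'
          · subst he; exact Or.inl ⟨hlt, hq1⟩
          · exact Or.inr ⟨s', hs', hlt⟩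
    · exact ih stack q hq hpos' 

theorem pvCov_append (xs ys : List (Nat × Nat)) (q : Nat) :
    pvCov (xs ++ ys) q = (pvCov xs q || pvCov ys q) := by
  simp [pvCov, List.any_append]

theorem pvM (n : Nat) : ∀ (ts : List (Nat × List Char)) (stS stC stA : List Nat)
    (prodS prodC prodA : List (Nat × Nat)) (sq cur angle : Int),
    (∀ t ∈ ts, t.1 < n) →
    List.Pairwise (fun a b => a.1 < b.1) ts →
    (∀ s ∈ stS, ∀ t ∈ ts, s < t.1) → (∀ s ∈ stC, ∀ t ∈ ts, s < t.1) → (∀ s ∈ stA, ∀ t ∈ ts, s < t.1) →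
    (∀ ab ∈ prodS, ∀ t ∈ ts, ab.2 ≤ t.1) → (∀ ab ∈ prodC, ∀ t ∈ ts, ab.2 ≤ t.1) → (∀ ab ∈ prodA, ∀ t ∈ ts, ab.2 ≤ t.1) →
    sq = (stS.length : Int) → cur = (stC.length : Int) → angle = (stA.length : Int) →
    pvCutsD ts sq cur angle =
      (ts.filter (fun t => t.2 == ['|'] &&
        !(pvCov (prodS ++ pvPair n ['[', '['] [']', ']'] ts stS) t.1 ||
          pvCov (prodC ++ pvPair n ['{', '{'] ['}', '}'] ts stC) t.1 ||
          pvCov (prodA ++ pvPair n ['<'] ['>'] ts stA) t.1))).map Prod.fst := by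
  intro ts
  induction ts with
  | nil =>
    intro stS stC stA prodS prodC prodA sq cur angle _ _ _ _ _ _ _ _ _ _ _
    simp [pvCutsD]
  | cons t ts ih =>
    intro stS stC stA prodS prodC prodA sq cur angle hlt hord hstS hstC hstA hpS hpC hpA hsq hcur hang
    have hmem : t ∈ t :: ts := List.mem_cons_self ..
    have hlt' : ∀ t' ∈ ts, t'.1 < n := fun t' h => hlt t' (List.mem_cons_of_mem _ h)
    rw [List.pairwise_cons] at hord
    obtain ⟨hhd, hord'⟩ := hord
    have hstS' : ∀ s ∈ stS, ∀ t' ∈ ts, s < t'.1 := fun s hs t' h => hstS s hs t' (List.mem_cons_of_mem _ h)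
    have hstC' : ∀ s ∈ stC, ∀ t' ∈ ts, s < t'.1 := fun s hs t' h => hstC s hs t' (List.mem_cons_of_mem _ h)
    have hstA' : ∀ s ∈ stA, ∀ t' ∈ ts, s < t'.1 := fun s hs t' h => hstA s hs t' (List.mem_cons_of_mem _ h)
    have hpS' : ∀ ab ∈ prodS, ∀ t' ∈ ts, ab.2 ≤ t'.1 := fun ab h t' h' => hpS ab h t' (List.mem_cons_of_mem _ h')
    have hpC' : ∀ ab ∈ prodC, ∀ t' ∈ ts, ab.2 ≤ t'.1 := fun ab h t' h' => hpC ab h t' (List.mem_cons_of_mem _ h')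
    have hpA' : ∀ ab ∈ prodA, ∀ t' ∈ ts, ab.2 ≤ t'.1 := fun ab h t' h' => hpA ab h t' (List.mem_cons_of_mem _ h')
    by_cases h1 : t.2 = ['[', '[']
    · have e0 : pvCutsD (t :: ts) sq cur angle = pvCutsD ts (sq + 1) cur angle := by
        rw [pvCutsD, if_pos h1]
      have eS : pvPair n ['[', '['] [']', ']'] (t :: ts) stS
          = pvPair n ['[', '['] [']', ']'] ts (t.1 :: stS) := by simp [pvPair, h1]
      have eC : pvPair n ['{', '{'] ['}', '}'] (t :: ts) stC
          = pvPair n ['{', '{'] ['}', '}'] ts stC := by simp [pvPair, h1]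
      have eA : pvPair n ['<'] ['>'] (t :: ts) stA = pvPair n ['<'] ['>'] ts stA := by
        simp [pvPair, h1]
      have hf : (t.2 == (['|'] : List Char)) = false := by rw [h1]; decide
      rw [e0, eS, eC, eA, List.filter_cons]
      simp only [hf, Bool.false_and, if_false, Bool.false_eq_true, ite_false]
      exact ih (t.1 :: stS) stC stA prodS prodC prodA (sq + 1) cur angle hlt' hord'
        (by intro s hs t' ht'
            rcases List.mem_cons.mp hs with he | hs
            · subst he; exact hhd t' ht'
            · exact hstS' s hs t' ht')
        hstC' hstA' hpS' hpC' hpA' (by rw [hsq]; simp only [List.length_cons]; push_cast; omega) hcur hang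
    · by_cases h2 : t.2 = [']', ']']
      · have e0 : pvCutsD (t :: ts) sq cur angle = pvCutsD ts (max 0 (sq - 1)) cur angle := by
          rw [pvCutsD, if_neg h1, if_pos h2]
        have eC : pvPair n ['{', '{'] ['}', '}'] (t :: ts) stC
            = pvPair n ['{', '{'] ['}', '}'] ts stC := by simp [pvPair, h2]
        have eA : pvPair n ['<'] ['>'] (t :: ts) stA = pvPair n ['<'] ['>'] ts stA := by
          simp [pvPair, h2]
        have hf : (t.2 == (['|'] : List Char)) = false := by rw [h2]; decide
        match stS, hsq, hstS, hstS' with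
        | [], hsq, hstS, hstS' =>
          have eS : pvPair n ['[', '['] [']', ']'] (t :: ts) []
              = pvPair n ['[', '['] [']', ']'] ts [] := by simp [pvPair, h2]
          rw [e0, eS, eC, eA, List.filter_cons]
          simp only [hf, Bool.false_and, if_false, Bool.false_eq_true, ite_false]
          exact ih [] stC stA prodS prodC prodA (max 0 (sq - 1)) cur angle hlt' hord'
            (by intro s hs; simp at hs) hstC' hstA' hpS' hpC' hpA'
            (by simp at hsq ⊢; omega) hcur hang
        | s :: rest, hsq, hstS, hstS' =>
          have eS : pvPair n ['[', '['] [']', ']'] (t :: ts) (s :: rest)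
              = (s, t.1) :: pvPair n ['[', '['] [']', ']'] ts rest := by simp [pvPair, h2]
          rw [e0, eS, eC, eA, List.filter_cons]
          simp only [hf, Bool.false_and, if_false, Bool.false_eq_true, ite_false]
          rw [show prodS ++ (s, t.1) :: pvPair n ['[', '['] [']', ']'] ts rest
              = (prodS ++ [(s, t.1)]) ++ pvPair n ['[', '['] [']', ']'] ts rest by simp]
          exact ih rest stC stA (prodS ++ [(s, t.1)]) prodC prodA (max 0 (sq - 1)) cur angle
            hlt' hord'
            (fun s' hs' t' ht' => hstS' s' (List.mem_cons_of_mem _ hs') t' ht')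
            hstC' hstA'
            (by intro ab hab t' ht'
                rcases List.mem_append.mp hab with h | h
                · exact hpS' ab h t' ht'
                · simp at h; subst h; exact Nat.le_of_lt (hhd t' ht'))
            hpC' hpA' (by simp at hsq ⊢; omega) hcur hang
      · by_cases h3 : t.2 = ['{', '{']
        · have e0 : pvCutsD (t :: ts) sq cur angle = pvCutsD ts sq (cur + 1) angle := by
            rw [pvCutsD, if_neg h1, if_neg h2, if_pos h3]
          have eS : pvPair n ['[', '['] [']', ']'] (t :: ts) stS
              = pvPair n ['[', '['] [']', ']'] ts stS := by simp [pvPair, h3]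
          have eC : pvPair n ['{', '{'] ['}', '}'] (t :: ts) stC
              = pvPair n ['{', '{'] ['}', '}'] ts (t.1 :: stC) := by simp [pvPair, h3]
          have eA : pvPair n ['<'] ['>'] (t :: ts) stA = pvPair n ['<'] ['>'] ts stA := by
            simp [pvPair, h3]
          have hf : (t.2 == (['|'] : List Char)) = false := by rw [h3]; decide
          rw [e0, eS, eC, eA, List.filter_cons]
          simp only [hf, Bool.false_and, if_false, Bool.false_eq_true, ite_false]
          exact ih stS (t.1 :: stC) stA prodS prodC prodA sq (cur + 1) angle hlt' hord'
            hstS'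
            (by intro s hs t' ht'
                rcases List.mem_cons.mp hs with he | hs
                · subst he; exact hhd t' ht'
                · exact hstC' s hs t' ht')
            hstA' hpS' hpC' hpA' hsq (by rw [hcur]; simp only [List.length_cons]; push_cast; omega) hang
        · by_cases h4 : t.2 = ['}', '}']
          · have e0 : pvCutsD (t :: ts) sq cur angle = pvCutsD ts sq (max 0 (cur - 1)) angle := by
              rw [pvCutsD, if_neg h1, if_neg h2, if_neg h3, if_pos h4]
            have eS : pvPair n ['[', '['] [']', ']'] (t :: ts) stS
                = pvPair n ['[', '['] [']', ']'] ts stS := by simp [pvPair, h4]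
            have eA : pvPair n ['<'] ['>'] (t :: ts) stA = pvPair n ['<'] ['>'] ts stA := by
              simp [pvPair, h4]
            have hf : (t.2 == (['|'] : List Char)) = false := by rw [h4]; decide
            match stC, hcur, hstC, hstC' with
            | [], hcur, hstC, hstC' =>
              have eC : pvPair n ['{', '{'] ['}', '}'] (t :: ts) []
                  = pvPair n ['{', '{'] ['}', '}'] ts [] := by simp [pvPair, h4]
              rw [e0, eS, eC, eA, List.filter_cons]
              simp only [hf, Bool.false_and, if_false, Bool.false_eq_true, ite_false]
              exact ih stS [] stA prodS prodC prodA sq (max 0 (cur - 1)) angle hlt' hord'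
                hstS' (by intro s hs; simp at hs) hstA' hpS' hpC' hpA'
                hsq (by simp at hcur ⊢; omega) hang
            | s :: rest, hcur, hstC, hstC' =>
              have eC : pvPair n ['{', '{'] ['}', '}'] (t :: ts) (s :: rest)
                  = (s, t.1) :: pvPair n ['{', '{'] ['}', '}'] ts rest := by simp [pvPair, h4]
              rw [e0, eS, eC, eA, List.filter_cons]
              simp only [hf, Bool.false_and, if_false, Bool.false_eq_true, ite_false]
              rw [show prodC ++ (s, t.1) :: pvPair n ['{', '{'] ['}', '}'] ts rest
                  = (prodC ++ [(s, t.1)]) ++ pvPair n ['{', '{'] ['}', '}'] ts rest by simp]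
              exact ih stS rest stA prodS (prodC ++ [(s, t.1)]) prodA sq (max 0 (cur - 1)) angle
                hlt' hord' hstS'
                (fun s' hs' t' ht' => hstC' s' (List.mem_cons_of_mem _ hs') t' ht')
                hstA' hpS'
                (by intro ab hab t' ht'
                    rcases List.mem_append.mp hab with h | h
                    · exact hpC' ab h t' ht'
                    · simp at h; subst h; exact Nat.le_of_lt (hhd t' ht'))
                hpA' hsq (by simp at hcur ⊢; omega) hang
          · by_cases h5 : t.2 = ['<']
            · have e0 : pvCutsD (t :: ts) sq cur angle = pvCutsD ts sq cur (angle + 1) := by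
                rw [pvCutsD, if_neg h1, if_neg h2, if_neg h3, if_neg h4, if_pos h5]
              have eS : pvPair n ['[', '['] [']', ']'] (t :: ts) stS
                  = pvPair n ['[', '['] [']', ']'] ts stS := by simp [pvPair, h5]
              have eC : pvPair n ['{', '{'] ['}', '}'] (t :: ts) stC
                  = pvPair n ['{', '{'] ['}', '}'] ts stC := by simp [pvPair, h5]
              have eA : pvPair n ['<'] ['>'] (t :: ts) stA
                  = pvPair n ['<'] ['>'] ts (t.1 :: stA) := by simp [pvPair, h5]
              have hf : (t.2 == (['|'] : List Char)) = false := by rw [h5]; decide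
              rw [e0, eS, eC, eA, List.filter_cons]
              simp only [hf, Bool.false_and, if_false, Bool.false_eq_true, ite_false]
              exact ih stS stC (t.1 :: stA) prodS prodC prodA sq cur (angle + 1) hlt' hord'
                hstS' hstC'
                (by intro s hs t' ht'
                    rcases List.mem_cons.mp hs with he | hs
                    · subst he; exact hhd t' ht'
                    · exact hstA' s hs t' ht')
                hpS' hpC' hpA' hsq hcur (by rw [hang]; simp only [List.length_cons]; push_cast; omega)
            · by_cases h6 : t.2 = ['>']
              · have e0 : pvCutsD (t :: ts) sq cur angle
                    = pvCutsD ts sq cur (max 0 (angle - 1)) := by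
                  rw [pvCutsD, if_neg h1, if_neg h2, if_neg h3, if_neg h4, if_neg h5, if_pos h6]
                have eS : pvPair n ['[', '['] [']', ']'] (t :: ts) stS
                    = pvPair n ['[', '['] [']', ']'] ts stS := by simp [pvPair, h6]
                have eC : pvPair n ['{', '{'] ['}', '}'] (t :: ts) stC
                    = pvPair n ['{', '{'] ['}', '}'] ts stC := by simp [pvPair, h6]
                have hf : (t.2 == (['|'] : List Char)) = false := by rw [h6]; decide
                match stA, hang, hstA, hstA' with
                | [], hang, hstA, hstA' =>
                  have eA : pvPair n ['<'] ['>'] (t :: ts) []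
                      = pvPair n ['<'] ['>'] ts [] := by simp [pvPair, h6]
                  rw [e0, eS, eC, eA, List.filter_cons]
                  simp only [hf, Bool.false_and, if_false, Bool.false_eq_true, ite_false]
                  exact ih stS stC [] prodS prodC prodA sq cur (max 0 (angle - 1)) hlt' hord'
                    hstS' hstC' (by intro s hs; simp at hs) hpS' hpC' hpA'
                    hsq hcur (by simp at hang ⊢; omega)
                | s :: rest, hang, hstA, hstA' =>
                  have eA : pvPair n ['<'] ['>'] (t :: ts) (s :: rest)
                      = (s, t.1) :: pvPair n ['<'] ['>'] ts rest := by simp [pvPair, h6]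
                  rw [e0, eS, eC, eA, List.filter_cons]
                  simp only [hf, Bool.false_and, if_false, Bool.false_eq_true, ite_false]
                  rw [show prodA ++ (s, t.1) :: pvPair n ['<'] ['>'] ts rest
                      = (prodA ++ [(s, t.1)]) ++ pvPair n ['<'] ['>'] ts rest by simp]
                  exact ih stS stC rest prodS prodC (prodA ++ [(s, t.1)]) sq cur
                    (max 0 (angle - 1)) hlt' hord' hstS' hstC'
                    (fun s' hs' t' ht' => hstA' s' (List.mem_cons_of_mem _ hs') t' ht')
                    hpS' hpC'
                    (by intro ab hab t' ht'
                        rcases List.mem_append.mp hab with h | h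
                        · exact hpA' ab h t' ht'
                        · simp at h; subst h; exact Nat.le_of_lt (hhd t' ht'))
                    hsq hcur (by simp at hang ⊢; omega)
              · by_cases h7 : t.2 = ['|']
                · -- the '|' token: covered ↔ some stack nonempty ↔ some depth nonzero
                  have hqn : t.1 < n := hlt t hmem
                  have eS : pvPair n ['[', '['] [']', ']'] (t :: ts) stS
                      = pvPair n ['[', '['] [']', ']'] ts stS := by simp [pvPair, h7]
                  have eC : pvPair n ['{', '{'] ['}', '}'] (t :: ts) stC
                      = pvPair n ['{', '{'] ['}', '}'] ts stC := by simp [pvPair, h7]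
                  have eA : pvPair n ['<'] ['>'] (t :: ts) stA
                      = pvPair n ['<'] ['>'] ts stA := by simp [pvPair, h7]
                  have hprodF : ∀ (prod : List (Nat × Nat)),
                      (∀ ab ∈ prod, ∀ t' ∈ t :: ts, ab.2 ≤ t'.1) → pvCov prod t.1 = false := by
                    intro prod hp
                    rw [pvCov, List.any_eq_false]
                    rintro ⟨a, b⟩ hab
                    have := hp (a, b) hab t hmem
                    simp at this ⊢
                    omega
                  have hpair : ∀ (op cl : List Char) (st : List Nat),
                      (∀ s ∈ st, ∀ t' ∈ t :: ts, s < t'.1) →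
                      (pvCov (pvPair n op cl ts st) t.1 = true ↔ st ≠ []) := by
                    intro op cl st hst
                    rw [pvC n op cl ts st t.1 hqn hhd]
                    constructor
                    · rintro ⟨s, hs, _⟩ h
                      subst h; simp at hs
                    · intro hne
                      obtain ⟨s, hs⟩ := List.exists_mem_of_ne_nil st hne
                      exact ⟨s, hs, hst s hs t hmem⟩
                  have hT : (t.2 == (['|'] : List Char)) = true := by rw [h7]; decide
                  by_cases h8 : sq = 0 ∧ cur = 0 ∧ angle = 0
                  · have hS0 : stS = [] := by
                      rw [hsq] at h8; simpa using h8.1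
                    have hC0 : stC = [] := by
                      rw [hcur] at h8; simpa using h8.2.1
                    have hA0 : stA = [] := by
                      rw [hang] at h8; simpa using h8.2.2
                    have cS : pvCov (prodS ++ pvPair n ['[', '['] [']', ']'] ts stS) t.1
                        = false := by
                      rw [pvCov_append, hprodF prodS hpS, Bool.false_or,
                        Bool.eq_false_iff]
                      intro hc
                      exact (hpair _ _ stS hstS).mp hc hS0
                    have cC : pvCov (prodC ++ pvPair n ['{', '{'] ['}', '}'] ts stC) t.1
                        = false := by
                      rw [pvCov_append, hprodF prodC hpC, Bool.false_or, Bool.eq_false_iff]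
                      intro hc
                      exact (hpair _ _ stC hstC).mp hc hC0
                    have cA : pvCov (prodA ++ pvPair n ['<'] ['>'] ts stA) t.1 = false := by
                      rw [pvCov_append, hprodF prodA hpA, Bool.false_or, Bool.eq_false_iff]
                      intro hc
                      exact (hpair _ _ stA hstA).mp hc hA0
                    have e0 : pvCutsD (t :: ts) sq cur angle = t.1 :: pvCutsD ts sq cur angle := by
                      rw [pvCutsD, if_neg h1, if_neg h2, if_neg h3, if_neg h4, if_neg h5,
                        if_neg h6, if_pos ⟨h7, h8⟩]
                    rw [e0, eS, eC, eA, List.filter_cons]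
                    simp only [hT, cS, cC, cA, Bool.or_self, Bool.or_false, Bool.not_false,
                      Bool.and_true, Bool.true_and, if_true, List.map_cons]
                    exact congrArg (t.1 :: ·)
                      (ih stS stC stA prodS prodC prodA sq cur angle hlt' hord' hstS' hstC'
                        hstA' hpS' hpC' hpA' hsq hcur hang)
                  · have hcov : (pvCov (prodS ++ pvPair n ['[', '['] [']', ']'] ts stS) t.1 ||
                        pvCov (prodC ++ pvPair n ['{', '{'] ['}', '}'] ts stC) t.1 ||
                        pvCov (prodA ++ pvPair n ['<'] ['>'] ts stA) t.1) = true := by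
                      have : sq ≠ 0 ∨ cur ≠ 0 ∨ angle ≠ 0 := by tauto
                      rcases this with h | h | h
                      · have : stS ≠ [] := by
                          intro hc; rw [hsq, hc] at h; simp at h
                        rw [pvCov_append, (hpair _ _ stS hstS).mpr this]
                        simp
                      · have : stC ≠ [] := by
                          intro hc; rw [hcur, hc] at h; simp at h
                        rw [pvCov_append (prodC), (hpair _ _ stC hstC).mpr this]
                        simp
                      · have : stA ≠ [] := by
                          intro hc; rw [hang, hc] at h; simp at h
                        rw [pvCov_append (prodA), (hpair _ _ stA hstA).mpr this]
                        simp
                    have e0 : pvCutsD (t :: ts) sq cur angle = pvCutsD ts sq cur angle := by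
                      rw [pvCutsD, if_neg h1, if_neg h2, if_neg h3, if_neg h4, if_neg h5,
                        if_neg h6, if_neg (fun hc => h8 hc.2)]
                    rw [e0, eS, eC, eA, List.filter_cons]
                    simp only [hcov, Bool.not_true, Bool.and_false, Bool.false_eq_true,
                      ite_false]
                    exact ih stS stC stA prodS prodC prodA sq cur angle hlt' hord' hstS' hstC'
                      hstA' hpS' hpC' hpA' hsq hcur hang
                · have e0 : pvCutsD (t :: ts) sq cur angle = pvCutsD ts sq cur angle := by
                    rw [pvCutsD, if_neg h1, if_neg h2, if_neg h3, if_neg h4, if_neg h5,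
                      if_neg h6, if_neg (fun hc => h7 hc.1)]
                  have eS : pvPair n ['[', '['] [']', ']'] (t :: ts) stS
                      = pvPair n ['[', '['] [']', ']'] ts stS := by simp [pvPair, h1, h2]
                  have eC : pvPair n ['{', '{'] ['}', '}'] (t :: ts) stC
                      = pvPair n ['{', '{'] ['}', '}'] ts stC := by simp [pvPair, h3, h4]
                  have eA : pvPair n ['<'] ['>'] (t :: ts) stA
                      = pvPair n ['<'] ['>'] ts stA := by simp [pvPair, h5, h6]
                  have hf : (t.2 == (['|'] : List Char)) = false := by
                    rw [Bool.eq_false_iff]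
                    intro hc
                    exact h7 (by simpa using hc)
                  rw [e0, eS, eC, eA, List.filter_cons]
                  simp only [hf, Bool.false_and, if_false, Bool.false_eq_true, ite_false]
                  exact ih stS stC stA prodS prodC prodA sq cur angle hlt' hord' hstS' hstC'
                    hstA' hpS' hpC' hpA' hsq hcur hang

theorem split_template_params_py_eq_alt (text : String) :
    split_template_params_py text = split_template_params_py_alt text := by
  have hmain := pv_main text.toList text.toList.length [] 0 0 0 0 0 (by omega)
  simp only [List.drop_zero] at hmain
  have hlb := pvTok_lb text.toList.length text.toList 0 le_rfl
  have hpw := pvTok_pairwise text.toList.length text.toList 0 le_rfl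
  have hM := pvM text.toList.length (pvTok text.toList 0) [] [] [] [] [] [] 0 0 0
    (fun t ht => by have := hlb t ht; omega) hpw
    (by simp) (by simp) (by simp) (by simp) (by simp) (by simp) rfl rfl rfl
  rw [split_template_params_py, split_template_params_py_alt]

  rw [hmain, pvDRun_splitAt, pvSplitAt_foldl, hM]
  simp only [List.nil_append, pvCov_append, Bool.or_assoc]

-- ===== VERDICT =====
theorem split_template_params_py_spec : Claim_equal_split_template_params_py := by
  intro text _
  exact split_template_params_py_eq_alt text
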